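-- pv_equiv track=rewrite | github.com/Yucheng7713/CodingPracticeByYuch | Easy/717_1bit&2bitsCharacters.py | isOneBitCharacter_II
-- ===== SOURCE A (Python) =====
-- def isOneBitCharacter_II(bits):
--     if bits == []:
--         return False
--     elif all(b == 0 for b in bits):
--         return True
--     else:
--         bits = bits[::-1]
--         if bits[0] == 0:
--             if bits[1] == 0:
--                 return True
--             else:
--                 b_index, count = 1, 0
--                 while b_index < len(bits) and bits[b_index] == 1:
--                     count += 1
--                     b_index += 1
--                 if count % 2 == 0:
--                     return True
--         return False
-- ===== SOURCE B (Python) =====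
-- def isOneBitCharacter_II(bits):
--     # Forward greedy parse: jump 2 on a 1, else 1; last char must be a lone 0.
--     if not bits or bits[-1] != 0:
--         return False
--     i, n = 0, len(bits)
--     while i < n - 1:
--         i += 2 if bits[i] == 1 else 1
--     return i == n - 1
-- ===== Notes on version B (the rewrite author's own statement) =====
-- stated objective: idiomatic
-- what changed: Replaced the reverse-and-count-trailing-ones-parity logic with the canonical forward greedy parse (jump 2 on a 1, else 1) after guarding that the list is nonempty and ends in 0.
import Mathlib
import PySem

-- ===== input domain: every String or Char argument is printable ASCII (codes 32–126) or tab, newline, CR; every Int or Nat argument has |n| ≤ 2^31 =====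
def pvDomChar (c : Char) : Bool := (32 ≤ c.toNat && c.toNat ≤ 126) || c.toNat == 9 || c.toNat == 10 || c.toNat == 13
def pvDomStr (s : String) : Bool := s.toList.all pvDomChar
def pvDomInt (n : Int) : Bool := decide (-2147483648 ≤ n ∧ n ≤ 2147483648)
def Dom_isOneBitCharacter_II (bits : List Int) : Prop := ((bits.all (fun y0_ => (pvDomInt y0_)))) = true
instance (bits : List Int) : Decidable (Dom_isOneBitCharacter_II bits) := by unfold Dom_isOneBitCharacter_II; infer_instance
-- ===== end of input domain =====

-- B replaces A's reverse-and-count-trailing-ones-parity logic with the canonical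
-- forward greedy parse (jump 2 on a 1, else 1); same cost, more idiomatic.

-- ===== PORT A =====
-- while b_index < len(bits) and bits[b_index] == 1: count += 1; b_index += 1
-- (b_index < r.length guarantees the pyGet? is in range, so getD 0 is exact)
def pvALoop (r : List Int) (bIndex count : Nat) : Nat :=
  if bIndex < r.length then
    if (PySem.List.pyGet? r (bIndex : Int)).getD 0 = 1 then
      pvALoop r (bIndex + 1) (count + 1)
    else count
  else count
termination_by r.length - bIndex
decreasing_by omega

def isOneBitCharacter_II (bits : List Int) : Bool :=
  if bits = [] then false
  else if bits.all (fun b => b == 0) then true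
  else
    let r := bits.reverse          -- bits[::-1]
    if (PySem.List.pyGet? r 0).getD 0 = 0 then       -- bits[0] == 0 (r nonempty, so in range)
      if (PySem.List.pyGet? r 1).getD 0 = 0 then true  -- bits[1] == 0 (reached only with |r| ≥ 2)
      else
        if pvALoop r 1 0 % 2 = 0 then true
        else false
    else false

-- ===== PORT B =====
-- while i < n - 1: i += 2 if bits[i] == 1 else 1
-- (i < n - 1 guarantees the pyGet? is in range, so getD 0 is exact)
def pvBLoop (bits : List Int) (n i : Nat) : Nat :=
  if i < n - 1 then
    pvBLoop bits n (i + (if (PySem.List.pyGet? bits (i : Int)).getD 0 = 1 then 2 else 1))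
  else i
termination_by n - 1 - i
decreasing_by split <;> omega

def isOneBitCharacter_II_alt (bits : List Int) : Bool :=
  if bits = [] then false                                        -- not bits
  else if (PySem.List.pyGet? bits (-1)).getD 0 ≠ 0 then false    -- bits[-1] != 0
  else
    let n := bits.length
    decide (pvBLoop bits n 0 = n - 1)

-- ===== PRECONDITION & SPEC =====
def Spec_isOneBitCharacter_II (bits : List Int) (out : Bool) : Prop := out = isOneBitCharacter_II_alt bits
instance (bits : List Int) (out : Bool) : Decidable (Spec_isOneBitCharacter_II bits out) := by unfold Spec_isOneBitCharacter_II; infer_instance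

-- ===== CLAIM (what is proved, stated in full; the proofs are below) =====
def Claim_equal_isOneBitCharacter_II : Prop := ∀ (bits : List Int), Dom_isOneBitCharacter_II bits → Spec_isOneBitCharacter_II bits (isOneBitCharacter_II bits)

-- ===== LEMMAS AND PROOFS =====

-- length of the maximal leading run of 1s
def pvLeadOnes : List Int → Nat
  | [] => 0
  | x :: xs => if x = 1 then pvLeadOnes xs + 1 else 0

-- the greedy parse, as structural recursion on the list
def pvG : List Int → Bool
  | [] => false
  | [_] => true
  | x :: y :: rest => if x = 1 then pvG rest else pvG (y :: rest)

theorem pvG_cons_cons (x y : Int) (rest : List Int) :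
    pvG (x :: y :: rest) = if x = 1 then pvG rest else pvG (y :: rest) := by
  rw [pvG]

-- common reference value: head of the reversed list is 0 and the run of 1s after it has even length
def pvRef (r : List Int) : Bool :=
  match r with
  | [] => false
  | x :: xs => decide (x = 0) && decide (pvLeadOnes xs % 2 = 0)

theorem pvLeadOnes_append (u v : List Int) :
    pvLeadOnes (u ++ v) =
      if pvLeadOnes u = u.length then u.length + pvLeadOnes v else pvLeadOnes u := by
  induction u with
  | nil => simp [pvLeadOnes]
  | cons a u' ih =>
    simp only [List.cons_append, pvLeadOnes, List.length_cons]
    by_cases ha : a = 1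
    · simp only [ha, ih]
      by_cases h : pvLeadOnes u' = u'.length
      · simp [h]; omega
      · simp [h]
    · have h' : ¬ ((0 : Nat) = u'.length + 1) := by omega
      simp [ha]

theorem pvTrail_cons_ne_one (x : Int) (m : List Int) (hx : x ≠ 1) :
    pvLeadOnes (x :: m).reverse = pvLeadOnes m.reverse := by
  rw [List.reverse_cons, pvLeadOnes_append, List.length_reverse]
  by_cases h : pvLeadOnes m.reverse = m.length
  · simp [h, pvLeadOnes, hx]
  · simp [h]

theorem pvTrail_one_cons_parity (b : Int) (m : List Int) :
    pvLeadOnes ((1 : Int) :: b :: m).reverse % 2 = pvLeadOnes m.reverse % 2 := by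
  rw [List.reverse_cons, List.reverse_cons, List.append_assoc, pvLeadOnes_append,
    List.length_reverse]
  by_cases h : pvLeadOnes m.reverse = m.length
  · rw [if_pos h, h]
    by_cases hb : b = 1 <;> simp [pvLeadOnes, hb]
  · simp [h]

theorem pvLeadOnes_zero_of_all_zero (l : List Int) (h : ∀ a ∈ l, a = 0) :
    pvLeadOnes l = 0 := by
  cases l with
  | nil => rfl
  | cons x xs =>
    have hx : x = 0 := h x (by simp)
    simp [pvLeadOnes, hx]

-- A's counting loop computes the leading-ones run of the remaining suffix
theorem pvALoop_eq (r : List Int) (b c : Nat) :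
    pvALoop r b c = c + pvLeadOnes (r.drop b) := by
  by_cases hb : b < r.length
  · rw [pvALoop]
    have hdrop : r.drop b = r[b] :: r.drop (b + 1) := List.drop_eq_getElem_cons hb
    have hget : PySem.List.pyGet? r (b : Int) = some r[b] := PySem.List.pyGet?_ofNat r b hb
    by_cases h1 : r[b] = (1 : Int)
    · rw [if_pos hb, hget]
      simp only [Option.getD_some, if_pos h1]
      rw [pvALoop_eq r (b + 1) (c + 1), hdrop]
      simp [pvLeadOnes, h1]; omega
    · rw [if_pos hb, hget]
      simp only [Option.getD_some, if_neg h1, hdrop]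
      simp [pvLeadOnes, h1]
  · rw [pvALoop]
    have : r.drop b = [] := List.drop_eq_nil_of_le (by omega)
    simp [hb, this, pvLeadOnes]
termination_by r.length - b
decreasing_by omega

-- A equals the reference on the reversed list
theorem pvA_eq_ref (bits : List Int) : isOneBitCharacter_II bits = pvRef bits.reverse := by
  unfold isOneBitCharacter_II
  by_cases hnil : bits = []
  · simp [hnil, pvRef]
  · rw [if_neg hnil]
    obtain ⟨x, xs, hr⟩ : ∃ x xs, bits.reverse = x :: xs := by
      cases h : bits.reverse with
      | nil => exact absurd (by simpa using congrArg List.reverse h) hnil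
      | cons a l => exact ⟨a, l, rfl⟩
    by_cases hall : bits.all (fun b => b == 0) = true
    · -- all zeros: both sides true
      have hmem : ∀ a ∈ bits.reverse, a = 0 := by
        intro a ha
        have := (List.all_eq_true.mp hall) a (by simpa using ha)
        simpa using this
      have hx : x = 0 := hmem x (by simp [hr])
      have hxs : pvLeadOnes xs = 0 :=
        pvLeadOnes_zero_of_all_zero xs (fun a ha => hmem a (by simp [hr, ha]))
      simp [hall, pvRef, hr, hx, hxs]
    · rw [if_neg hall]
      simp only [hr]
      have h0 : PySem.List.pyGet? (x :: xs) 0 = some x := by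
        simp [PySem.List.pyGet?, PySem.List.pyIdx?]
      rw [h0]
      by_cases hx : x = 0
      · rw [Option.getD_some, if_pos hx]
        cases xs with
        | nil =>
          -- bits[1] raises in Python only if reached; here len ≥ 2 always holds when this
          -- branch is reached, but the port's getD 0 value (0) agrees with the reference anyway
          simp [PySem.List.pyGet?, PySem.List.pyIdx?, pvRef, hx, pvLeadOnes]
        | cons h t =>
          have h1 : PySem.List.pyGet? (x :: h :: t) 1 = some h := by
            simp [PySem.List.pyGet?, PySem.List.pyIdx?]
          rw [h1, Option.getD_some]
          by_cases hh : h = 0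
          · simp [hh, pvRef, hx, pvLeadOnes]
          · rw [if_neg hh]
            have : pvALoop (x :: h :: t) 1 0 = pvLeadOnes (h :: t) := by
              rw [pvALoop_eq]; simp
            rw [this]
            by_cases hp : pvLeadOnes (h :: t) % 2 = 0 <;> simp [hp, pvRef, hx]
      · simp [hx, pvRef]

-- B's forward loop, started at i, succeeds iff the greedy parse of the suffix succeeds
theorem pvBLoop_iff (bits : List Int) (i : Nat) (hi : i < bits.length) :
    (pvBLoop bits bits.length i = bits.length - 1) ↔ pvG (bits.drop i) = true := by
  by_cases hlast : i < bits.length - 1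
  · have hdrop : bits.drop i = bits[i] :: bits.drop (i + 1) := List.drop_eq_getElem_cons hi
    have hi1 : i + 1 < bits.length := by omega
    have hdrop1 : bits.drop (i + 1) = bits[i+1] :: bits.drop (i + 2) :=
      List.drop_eq_getElem_cons hi1
    have hget : PySem.List.pyGet? bits (i : Int) = some bits[i] := PySem.List.pyGet?_ofNat bits i hi
    rw [pvBLoop, if_pos hlast, hget]
    by_cases h1 : bits[i] = (1 : Int)
    · simp only [Option.getD_some, if_pos h1]
      by_cases h2 : i + 2 < bits.length
      · rw [pvBLoop_iff bits (i + 2) h2, hdrop, hdrop1, pvG_cons_cons, if_pos h1]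
      · -- i + 2 = bits.length : loop exits at i+2 ≠ n-1; greedy parse fails
        have hd2 : bits.drop (i + 2) = [] := List.drop_eq_nil_of_le (by omega)
        rw [pvBLoop, if_neg (by omega)]
        constructor
        · intro h; omega
        · intro h
          rw [hdrop, hdrop1, hd2, pvG_cons_cons, if_pos h1] at h
          simp [pvG] at h
    · simp only [Option.getD_some, if_neg h1]
      rw [pvBLoop_iff bits (i + 1) hi1, hdrop, hdrop1, pvG_cons_cons, if_neg h1]
  · have hie : i = bits.length - 1 := by omega
    subst hie
    rw [pvBLoop, if_neg hlast]
    have hdrop : bits.drop (bits.length - 1) = [bits[bits.length - 1]] := by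
      rw [List.drop_eq_getElem_cons hi, List.drop_eq_nil_of_le (by omega)]
    simp [hdrop, pvG]
termination_by bits.length - i
decreasing_by all_goals omega

-- greedy parse ⇔ the run of 1s just before the last element has even length
theorem pvG_iff (l : List Int) (hne : l ≠ []) :
    pvG l = true ↔ pvLeadOnes l.dropLast.reverse % 2 = 0 := by
  match l with
  | [x] => simp [pvG, pvLeadOnes]
  | [x, y] =>
    by_cases hx : x = 1 <;> simp [pvG, hx, pvLeadOnes]
  | x :: y :: r :: rs =>
    have hd : (x :: y :: r :: rs).dropLast = x :: y :: (r :: rs).dropLast := by simp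
    by_cases hx : x = 1
    · subst hx
      have ih := pvG_iff (r :: rs) (by simp)
      have hpar := pvTrail_one_cons_parity y ((r :: rs).dropLast)
      have hg : pvG ((1 : Int) :: y :: r :: rs) = pvG (r :: rs) := by simp [pvG]
      rw [hg, ih, hd]
      omega
    · have ih := pvG_iff (y :: r :: rs) (by simp)
      have hT := pvTrail_cons_ne_one x (y :: (r :: rs).dropLast) hx
      have hd2 : (y :: r :: rs).dropLast = y :: (r :: rs).dropLast := by simp
      have hg : pvG (x :: y :: r :: rs) = pvG (y :: r :: rs) := by simp [pvG, hx]
      rw [hg, ih, hd2, hd, hT]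
termination_by l.length

-- B equals the reference on the reversed list
theorem pvB_eq_ref (bits : List Int) : isOneBitCharacter_II_alt bits = pvRef bits.reverse := by
  unfold isOneBitCharacter_II_alt
  by_cases hnil : bits = []
  · simp [hnil, pvRef]
  · rw [if_neg hnil]
    have hrev : bits.reverse = bits.getLast hnil :: bits.dropLast.reverse := by
      conv_lhs => rw [← List.dropLast_concat_getLast hnil]
      simp
    have hlast : PySem.List.pyGet? bits (-1) = some (bits.getLast hnil) := by
      rw [PySem.List.pyGet?_neg_one]
      exact List.getLast?_eq_some_getLast (h := hnil)
    rw [hlast, Option.getD_some]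
    by_cases h0 : bits.getLast hnil = 0
    · rw [if_neg (by simpa using h0)]
      have hlen : 0 < bits.length := List.length_pos_iff.mpr hnil
      have := pvBLoop_iff bits 0 hlen
      simp only [List.drop_zero] at this
      have hg := pvG_iff bits hnil
      rw [hrev]
      simp only [pvRef, h0, decide_true, Bool.true_and]
      by_cases hp : pvLeadOnes bits.dropLast.reverse % 2 = 0
      · simp [hp, this, hg]
      · simp only [hp, decide_false]
        rw [decide_eq_false]
        intro hc
        exact hp (hg.mp (this.mp hc))
    · rw [if_pos (by simpa using h0), hrev]
      simp [pvRef, h0]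

-- ===== VERDICT (by name: the statement is the Claim_ definition above) =====
theorem isOneBitCharacter_II_spec : Claim_equal_isOneBitCharacter_II := by
  intro bits _
  unfold Spec_isOneBitCharacter_II
  rw [pvA_eq_ref, pvB_eq_ref]
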